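-- pv_equiv track=rewrite | github.com/kjyoa09/coding-test | pg/level 1/모의고사.py | solution
-- ===== SOURCE A (Python) =====
-- def solution(answers):
--
--     ans1 = [1, 2, 3, 4, 5, 1, 2, 3, 4, 5] * (10000//10)
--     ans2 = [2, 1, 2, 3, 2, 4, 2, 5, 2, 1, 2, 3, 2, 4, 2, 5] * (10000//16 + 1)
--     ans3 = [3, 3, 1, 1, 2, 2, 4, 4, 5, 5, 3, 3, 1, 1, 2, 2, 4, 4, 5, 5] * (10000//20 + 1)
--
--     ans = [0,0,0]
--     while answers:
--         tmp_an,a1,a2,a3 = answers.pop(0),ans1.pop(0),ans2.pop(0),ans3.pop(0)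
--         if tmp_an == a1:
--             ans[0] +=1
--         if tmp_an == a2:
--             ans[1] +=1
--         if tmp_an == a3:
--             ans[2] +=1
--
--     return [idx+1 for idx,x in enumerate(ans) if x == max(ans)]
-- ===== SOURCE B (Python) =====
-- def solution(answers):
--     p1 = [1, 2, 3, 4, 5]
--     p2 = [2, 1, 2, 3, 2, 4, 2, 5]
--     p3 = [3, 3, 1, 1, 2, 2, 4, 4, 5, 5]
--     s = [0, 0, 0]
--     for i, a in enumerate(answers):
--         if a == p1[i % 5]:
--             s[0] += 1
--         if a == p2[i % 8]:
--             s[1] += 1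
--         if a == p3[i % 10]:
--             s[2] += 1
--     m = max(s)
--     return [i + 1 for i in range(3) if s[i] == m]
-- ===== Notes on version B (the rewrite author's own statement) =====
-- stated objective: faster
-- what changed: Replaces the pop(0)-driven consumption of three 10000-element prebuilt answer lists by a single indexed pass using modular indexing into the three short base patterns.
import Mathlib
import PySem

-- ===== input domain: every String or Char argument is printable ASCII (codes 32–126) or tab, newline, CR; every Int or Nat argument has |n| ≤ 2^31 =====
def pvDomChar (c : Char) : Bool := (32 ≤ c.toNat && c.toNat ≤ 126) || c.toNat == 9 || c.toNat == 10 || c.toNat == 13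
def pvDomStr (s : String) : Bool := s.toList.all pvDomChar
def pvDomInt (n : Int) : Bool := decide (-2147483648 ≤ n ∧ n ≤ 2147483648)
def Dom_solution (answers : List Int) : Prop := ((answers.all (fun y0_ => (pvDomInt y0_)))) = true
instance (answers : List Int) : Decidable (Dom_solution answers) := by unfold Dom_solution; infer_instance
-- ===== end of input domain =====

-- B replaces A's pop(0) consumption of three prebuilt 10000-element lists by one
-- indexed pass with modular indexing into the short base patterns (objective: faster;
-- note: A empties its `answers` argument in place, B does not mutate it — the
-- equivalence proved here is about the return value only).

-- ===== PORT A =====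
-- Python `lst * n` (list repetition):
def pyRep (l : List Int) (n : Nat) : List Int := (List.replicate n l).flatten

-- the while-loop: pop(0) from answers and from the three prebuilt lists each round.
-- (pop(0) on an exhausted prebuilt list raises IndexError in Python; Pre_solution
-- excludes exactly those inputs, so headD/tail is only evaluated on nonempty lists there)
def solnLoop : List Int → List Int → List Int → List Int → Int × Int × Int → Int × Int × Int
  | [], _, _, _, s => s
  | a :: as, l1, l2, l3, (c1, c2, c3) =>
      solnLoop as l1.tail l2.tail l3.tail
        (c1 + (if a = l1.headD 0 then 1 else 0),
         c2 + (if a = l2.headD 0 then 1 else 0),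
         c3 + (if a = l3.headD 0 then 1 else 0))

def solution (answers : List Int) : List Int :=
  let ans1 := pyRep [1, 2, 3, 4, 5, 1, 2, 3, 4, 5] (10000 / 10)
  let ans2 := pyRep [2, 1, 2, 3, 2, 4, 2, 5, 2, 1, 2, 3, 2, 4, 2, 5] (10000 / 16 + 1)
  let ans3 := pyRep [3, 3, 1, 1, 2, 2, 4, 4, 5, 5, 3, 3, 1, 1, 2, 2, 4, 4, 5, 5] (10000 / 20 + 1)
  let c := solnLoop answers ans1 ans2 ans3 (0, 0, 0)
  let ansl := [c.1, c.2.1, c.2.2]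
  -- [idx+1 for idx,x in enumerate(ans) if x == max(ans)]
  ((PySem.List.enumerate ansl).filter (fun p => p.2 = max (max c.1 c.2.1) c.2.2)).map
    (fun p => p.1 + 1)

-- ===== PORT B =====
def pat1 : List Int := [1, 2, 3, 4, 5]
def pat2 : List Int := [2, 1, 2, 3, 2, 4, 2, 5]
def pat3 : List Int := [3, 3, 1, 1, 2, 2, 4, 4, 5, 5]

-- the for-loop over enumerate(answers): modular indexing into the short patterns
def altLoop : List Int → Nat → Int × Int × Int → Int × Int × Int
  | [], _, s => s
  | a :: as, i, (c1, c2, c3) =>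
      altLoop as (i + 1)
        (c1 + (if a = pat1.getD (i % 5) 0 then 1 else 0),
         c2 + (if a = pat2.getD (i % 8) 0 then 1 else 0),
         c3 + (if a = pat3.getD (i % 10) 0 then 1 else 0))

def solution_alt (answers : List Int) : List Int :=
  let c := altLoop answers 0 (0, 0, 0)
  let s := [c.1, c.2.1, c.2.2]
  let m := max (max c.1 c.2.1) c.2.2
  ((PySem.List.pyRange 0 3 1).filter (fun i => PySem.List.pyGetD s i 0 = m)).map (fun i => i + 1)

-- ===== PRECONDITION & SPEC =====
-- Pre_ excludes inputs longer than 10000, on which A's pop(0) on its exhausted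
-- prebuilt answer lists raises IndexError.
def Pre_solution (answers : List Int) : Prop := answers.length ≤ 10000
instance (answers : List Int) : Decidable (Pre_solution answers) := by unfold Pre_solution; infer_instance
def pvWitness_solution : List Int := ([1, 2, 3, 1, 2])

def Spec_solution (answers : List Int) (out : List Int) : Prop := out = solution_alt answers
instance (answers : List Int) (out : List Int) : Decidable (Spec_solution answers out) := by unfold Spec_solution; infer_instance

-- ===== CLAIM (what is proved, stated in full; the proofs are below) =====
def Claim_equal_solution : Prop := ∀ (answers : List Int), Dom_solution answers → Pre_solution answers → Spec_solution answers (solution answers)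

-- ===== LEMMAS AND PROOFS =====

-- indexing into a repeated list is modular indexing into the base list
theorem flatRep_getElem? (l : List Int) (n i : Nat) (h : i < n * l.length) :
    ((List.replicate n l).flatten)[i]? = l[i % l.length]? := by
  induction n generalizing i with
  | zero => simp at h
  | succ n ih =>
      rw [List.replicate_succ, List.flatten_cons]
      by_cases hi : i < l.length
      · rw [List.getElem?_append_left hi, Nat.mod_eq_of_lt hi]
      · rw [Nat.not_lt] at hi
        rw [Nat.succ_mul] at h
        rw [List.getElem?_append_right hi, ih (i - l.length) (by omega),
          Nat.mod_eq_sub_mod hi]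

theorem big_elem (base pat : List Int) (n i : Nat)
    (hbase : base = pat ++ pat) (hlen : i < n * base.length)
    (hpos : 0 < pat.length) :
    (pyRep base n)[i]? = pat[i % pat.length]? := by
  have hbl : base.length = 2 * pat.length := by subst hbase; simp; omega
  have h2 : base = (List.replicate 2 pat).flatten := by simp [List.replicate, hbase]
  rw [pyRep, flatRep_getElem? base n i hlen, hbl, h2,
    flatRep_getElem? pat 2 _ (Nat.mod_lt i (by omega)),
    Nat.mod_mod_of_dvd i ⟨2, by ring⟩]

theorem loop_agree (as : List Int) (i : Nat) (s : Int × Int × Int)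
    (h : as.length + i ≤ 10000) :
    solnLoop as
      ((pyRep [1, 2, 3, 4, 5, 1, 2, 3, 4, 5] (10000 / 10)).drop i)
      ((pyRep [2, 1, 2, 3, 2, 4, 2, 5, 2, 1, 2, 3, 2, 4, 2, 5] (10000 / 16 + 1)).drop i)
      ((pyRep [3, 3, 1, 1, 2, 2, 4, 4, 5, 5, 3, 3, 1, 1, 2, 2, 4, 4, 5, 5] (10000 / 20 + 1)).drop i)
      s = altLoop as i s := by
  induction as generalizing i s with
  | nil => cases s; rfl
  | cons a as ih =>
      obtain ⟨c1, c2, c3⟩ := s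
      have hi1 : i < 10000 := by simp at h; omega
      have hd1 : ((pyRep [(1:Int), 2, 3, 4, 5, 1, 2, 3, 4, 5] (10000 / 10)).drop i).headD 0
          = pat1.getD (i % 5) 0 := by
        rw [List.headD_eq_head?, List.head?_drop,
          big_elem _ pat1 (10000 / 10) i (by decide) (by simp; omega) (by decide)]
        simp [List.getD, show pat1.length = 5 from rfl]
      have hd2 : ((pyRep [(2:Int), 1, 2, 3, 2, 4, 2, 5, 2, 1, 2, 3, 2, 4, 2, 5] (10000 / 16 + 1)).drop i).headD 0
          = pat2.getD (i % 8) 0 := by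
        rw [List.headD_eq_head?, List.head?_drop,
          big_elem _ pat2 (10000 / 16 + 1) i (by decide) (by simp; omega) (by decide)]
        simp [List.getD, show pat2.length = 8 from rfl]
      have hd3 : ((pyRep [(3:Int), 3, 1, 1, 2, 2, 4, 4, 5, 5, 3, 3, 1, 1, 2, 2, 4, 4, 5, 5] (10000 / 20 + 1)).drop i).headD 0
          = pat3.getD (i % 10) 0 := by
        rw [List.headD_eq_head?, List.head?_drop,
          big_elem _ pat3 (10000 / 20 + 1) i (by decide) (by simp; omega) (by decide)]
        simp [List.getD, show pat3.length = 10 from rfl]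
      rw [solnLoop, altLoop, hd1, hd2, hd3]
      rw [List.tail_drop, List.tail_drop, List.tail_drop]
      exact ih (i + 1) _ (by simp at h ⊢; omega)

-- the two comprehensions over the 3-element score list agree
theorem final_agree (c1 c2 c3 : Int) :
    ((PySem.List.enumerate [c1, c2, c3]).filter (fun p => p.2 = max (max c1 c2) c3)).map
      (fun p => p.1 + 1)
    = ((PySem.List.pyRange 0 3 1).filter
        (fun i => PySem.List.pyGetD [c1, c2, c3] i 0 = max (max c1 c2) c3)).map
      (fun i => i + 1) := by
  have he : PySem.List.enumerate [c1, c2, c3] = [(0, c1), (1, c2), (2, c3)] := by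
    norm_num [PySem.List.enumerate_cons, PySem.List.enumerate_nil]
  have hr : PySem.List.pyRange 0 3 1 = [0, 1, 2] := by decide
  have g0 : PySem.List.pyGetD [c1, c2, c3] 0 0 = c1 := rfl
  have g1 : PySem.List.pyGetD [c1, c2, c3] 1 0 = c2 := rfl
  have g2 : PySem.List.pyGetD [c1, c2, c3] 2 0 = c3 := rfl
  rw [he, hr]
  simp only [List.filter_cons, List.filter_nil, g0, g1, g2]
  split_ifs <;> simp

theorem solution_eq (answers : List Int) (h : answers.length ≤ 10000) :
    solution answers = solution_alt answers := by
  have h0 := loop_agree answers 0 (0, 0, 0) (by omega)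
  simp only [List.drop_zero] at h0
  simp only [solution, solution_alt, h0]
  exact final_agree _ _ _

-- ===== VERDICT (by name: the statement is the Claim_ definition above) =====
theorem solution_spec : Claim_equal_solution := by
  intro answers _ hpre
  exact solution_eq answers hpre
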